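-- pv_equiv track=rewrite | github.com/SRI-AIC/InterestingnessXRL | interestingness_xrl/data_mining/prefixspan.py | project_sequence
-- ===== SOURCE A (Python) =====
-- def project_sequence(sequence, prefix, new_event):
--     """
--     Projects a sequence according to a given prefix, as done in PrefixSpan.
--     See: https://github.com/sequenceanalysis/sequenceanalysis.github.io/blob/master/notebooks/part2.ipynb
--     :param list sequence: the sequence the projection is built from.
--     :param tuple prefix: the prefix that is searched for in the sequence.
--     :param bool new_event: if set to True, the first itemset is ignored.
--     :return: If the sequence does not contain the prefix, then None.
--     Otherwise, a new sequence starting from the position of the prefix, including the itemset that includes the prefix.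
--     """
--     result = None
--     for i, itemset in enumerate(sequence):
--         if result is None:
--             if (not new_event) or i > 0:
--                 if all(x in itemset for x in prefix):
--                     result = [tuple(itemset)]
--         else:
--             result.append(tuple(itemset))
--     return result
-- ===== SOURCE B (Python) =====
-- def project_sequence(sequence, prefix, new_event):
--     """Find the first matching position, then build the projection from the tail."""
--     start = 1 if new_event else 0
--     for i in range(start, len(sequence)):
--         if all(x in sequence[i] for x in prefix):
--             return [tuple(itemset) for itemset in sequence[i:]]
--     return None
-- ===== Notes on version B (the rewrite author's own statement) =====
-- stated objective: simpler
-- what changed: Replaces the single stateful pass with a result-is-None sentinel (which keeps iterating and appending after the match) by a position search over range(start, len) followed by one slice-and-map of the tail, returning early on the first match.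
import Mathlib
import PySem

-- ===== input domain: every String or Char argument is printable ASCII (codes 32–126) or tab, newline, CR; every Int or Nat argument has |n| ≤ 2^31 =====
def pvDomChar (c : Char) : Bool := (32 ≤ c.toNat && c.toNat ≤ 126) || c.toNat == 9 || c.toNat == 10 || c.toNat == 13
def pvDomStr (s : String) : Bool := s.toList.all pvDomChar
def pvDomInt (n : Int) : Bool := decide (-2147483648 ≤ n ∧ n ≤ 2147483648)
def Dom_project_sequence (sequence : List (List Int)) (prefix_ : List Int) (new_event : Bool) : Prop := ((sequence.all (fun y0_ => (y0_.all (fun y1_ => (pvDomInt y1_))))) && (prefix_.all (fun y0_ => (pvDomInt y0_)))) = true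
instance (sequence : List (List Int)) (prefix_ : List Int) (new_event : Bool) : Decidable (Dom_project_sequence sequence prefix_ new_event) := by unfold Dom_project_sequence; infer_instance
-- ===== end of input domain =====

-- B replaces A's single stateful appending pass (result-is-None sentinel) by a
-- find-the-first-matching-index search followed by a slice of the tail (objective: simpler).

-- ===== PORT A =====
-- result = None; for i, itemset in enumerate(sequence): if result is None: … else: result.append(tuple(itemset))
def project_sequence (sequence : List (List Int)) (prefix_ : List Int) (new_event : Bool) : Option (List (List Int)) :=
  (PySem.List.enumerate sequence).foldl
    (fun result p =>
      match result with
      | none =>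
          if ((!new_event) || decide ((0 : Int) < p.1)) &&
             prefix_.all (fun x => p.2.contains x) then some [p.2] else none
      | some r => some (r ++ [p.2]))
    none

-- ===== PORT B =====
-- start = 1 if new_event else 0; for i in range(start, len(sequence)): if all(x in sequence[i] for x in prefix): return sequence[i:]; return None
def project_sequence_alt (sequence : List (List Int)) (prefix_ : List Int) (new_event : Bool) : Option (List (List Int)) :=
  let start : Nat := if new_event then 1 else 0
  match (List.range' start (sequence.length - start)).find?
          (fun i => prefix_.all (fun x => (sequence.getD i []).contains x)) with
  | some i => some (sequence.drop i)
  | none => none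

-- ===== PRECONDITION & SPEC =====
def Spec_project_sequence (sequence : List (List Int)) (prefix_ : List Int) (new_event : Bool) (out : Option (List (List Int))) : Prop := out = project_sequence_alt sequence prefix_ new_event
instance (sequence : List (List Int)) (prefix_ : List Int) (new_event : Bool) (out : Option (List (List Int))) : Decidable (Spec_project_sequence sequence prefix_ new_event out) := by unfold Spec_project_sequence; infer_instance

-- ===== CLAIM (what is proved, stated in full; the proofs are below) =====
def Claim_equal_project_sequence : Prop := ∀ (sequence : List (List Int)) (prefix_ : List Int) (new_event : Bool), Dom_project_sequence sequence prefix_ new_event → Spec_project_sequence sequence prefix_ new_event (project_sequence sequence prefix_ new_event)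

-- ===== LEMMAS AND PROOFS =====

-- reference: first suffix whose head satisfies p
def pvSrch (p : List Int → Bool) : List (List Int) → Option (List (List Int))
  | [] => none
  | it :: rest => if p it then some (it :: rest) else pvSrch p rest

-- once A's accumulator is `some r`, the rest of the pass just appends every itemset
theorem pvAbsorb (prefix_ : List Int) (new_event : Bool) :
    ∀ (seq : List (List Int)) (s : Int) (r : List (List Int)),
    (PySem.List.enumerate seq s).foldl
      (fun result p =>
        match result with
        | none =>
            if ((!new_event) || decide ((0 : Int) < p.1)) &&
               prefix_.all (fun x => p.2.contains x) then some [p.2] else none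
        | some r => some (r ++ [p.2]))
      (some r) = some (r ++ seq) := by
  intro seq
  induction seq with
  | nil => intro s r; simp [PySem.List.enumerate_nil]
  | cons it rest ih =>
      intro s r
      simp only [PySem.List.enumerate_cons, List.foldl_cons, ih, List.append_assoc]
      rfl

-- A's pass from `none`, when the index condition is already satisfied, is the search
theorem pvScanA (prefix_ : List Int) (new_event : Bool) :
    ∀ (seq : List (List Int)) (s : Int), (new_event = false ∨ 0 < s) →
    (PySem.List.enumerate seq s).foldl
      (fun result p =>
        match result with
        | none =>
            if ((!new_event) || decide ((0 : Int) < p.1)) &&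
               prefix_.all (fun x => p.2.contains x) then some [p.2] else none
        | some r => some (r ++ [p.2]))
      none = pvSrch (fun it => prefix_.all (fun x => it.contains x)) seq := by
  intro seq
  induction seq with
  | nil => intro s _; simp [PySem.List.enumerate_nil, pvSrch]
  | cons it rest ih =>
      intro s hs
      have hc : ((!new_event) || decide ((0 : Int) < s)) = true := by
        rcases hs with h | h
        · simp [h]
        · simp [h]
      simp only [PySem.List.enumerate_cons, List.foldl_cons, hc, Bool.true_and]
      have hs' : new_event = false ∨ 0 < s + 1 := by
        rcases hs with h | h
        · exact Or.inl h
        · exact Or.inr (by omega)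
      cases hp : prefix_.all (fun x => it.contains x) with
      | true =>
          simp only [reduceIte]
          rw [pvAbsorb]
          simp only [pvSrch, hp, reduceIte]
          rfl
      | false =>
          simp only [Bool.false_eq_true, reduceIte]
          rw [ih (s + 1) hs']
          simp only [pvSrch, hp, Bool.false_eq_true, reduceIte]

-- B's index search over range'(k, n-k) is the search over seq.drop k
theorem pvScanB (prefix_ : List Int) :
    ∀ (m k : Nat) (seq : List (List Int)), k + m = seq.length →
    (match (List.range' k m).find?
            (fun i => prefix_.all (fun x => (seq.getD i []).contains x)) with
     | some i => some (seq.drop i)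
     | none => none) = pvSrch (fun it => prefix_.all (fun x => it.contains x)) (seq.drop k) := by
  intro m
  induction m with
  | zero =>
      intro k seq hk
      have hkk : k = seq.length := by omega
      subst hkk
      rw [show List.range' seq.length 0 = [] from rfl, List.find?_nil, List.drop_length]
      rfl
  | succ n ih =>
      intro k seq hk
      have hklt : k < seq.length := by omega
      have hdrop : seq.drop k = seq[k] :: seq.drop (k + 1) :=
        (List.getElem_cons_drop hklt).symm
      have hgetD : seq.getD k [] = seq[k] := List.getD_eq_getElem seq [] hklt
      rw [List.range'_succ, List.find?_cons]
      cases hp : prefix_.all (fun x => (seq.getD k []).contains x) with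
      | true =>
          simp only [hp]
          rw [hdrop]
          simp only [pvSrch, hgetD ▸ hp, reduceIte]
      | false =>
          simp only [hp]
          rw [ih (k + 1) seq (by omega), hdrop]
          simp only [pvSrch, hgetD ▸ hp, Bool.false_eq_true, reduceIte]

-- ===== VERDICT (by name: the statement is the Claim_ definition above) =====
theorem project_sequence_spec : Claim_equal_project_sequence := by
  intro seq prefix_ new_event _
  unfold Spec_project_sequence project_sequence project_sequence_alt
  cases new_event with
  | false =>
      rw [pvScanA prefix_ false seq 0 (Or.inl rfl)]
      exact (pvScanB prefix_ seq.length 0 seq (by omega)).symm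
  | true =>
      cases seq with
      | nil => simp [PySem.List.enumerate_nil]
      | cons it rest =>
          rw [PySem.List.enumerate_cons, List.foldl_cons]
          change List.foldl _ none (PySem.List.enumerate rest 1) = _
          rw [pvScanA prefix_ true rest 1 (Or.inr (by omega))]
          exact (pvScanB prefix_ rest.length 1 (it :: rest) (by simp only [List.length_cons]; omega)).symm
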